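-- pv_equiv track=rewrite | github.com/Dharshan8374/Cognify | backend/app.py | classify_note
-- ===== SOURCE A (Python) =====
-- def get_chord_notes(chord_name):
--     # Simple dictionary for common chords - expand as needed or use a library
--     # Logic: simplistic mapping for demo purposes
--     # Ideally use a library like mingus or music21 if available, but let's keep it light
--     root = chord_name[0]
--     if len(chord_name) > 1 and chord_name[1] == '#':
--         root = chord_name[:2]
--
--     # Basic Intervals relative to root
--     # Major: 0, 4, 7
--     # Minor: 0, 3, 7
--     # 7: 0, 4, 7, 10
--     # Maj7: 0, 4, 7, 11
--     # m7: 0, 3, 7, 10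
--
--     notes = ['C', 'C#', 'D', 'D#', 'E', 'F', 'F#', 'G', 'G#', 'A', 'A#', 'B']
--     try:
--         root_idx = notes.index(root)
--     except ValueError:
--         return []
--
--     intervals = [0, 4, 7] # Default Major
--     if 'm' in chord_name and 'maj' not in chord_name:
--         intervals = [0, 3, 7]
--
--     chord_notes = []
--     for interval in intervals:
--         note = notes[(root_idx + interval) % 12]
--         chord_notes.append(note)
--
--     return set(chord_notes)
--
-- def is_scale_note(note_name, key):
--     # Simplified scale check (Major scale of the key)
--     # Key should be e.g. "C", "G#"
--     if not key:
--         return True # Default to true if no key detected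
--
--     notes = ['C', 'C#', 'D', 'D#', 'E', 'F', 'F#', 'G', 'G#', 'A', 'A#', 'B']
--
--     # Major scale intervals: 2, 2, 1, 2, 2, 2, 1
--     major_scale_intervals = [0, 2, 4, 5, 7, 9, 11]
--
--     try:
--         root_idx = notes.index(key)
--     except ValueError:
--         return True
--
--     scale_notes = set()
--     for interval in major_scale_intervals:
--         scale_notes.add(notes[(root_idx + interval) % 12])
--
--     # note_name comes as "C#4", we need "C#"
--     pitch_class = ''.join([c for c in note_name if not c.isdigit()])
--     return pitch_class in scale_notes
--
-- def classify_note(note_name, chord_name, key):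
--     if not note_name or not chord_name:
--         return "Passing Note"
--
--     pitch_class = ''.join([c for c in note_name if not c.isdigit()])
--     chord_notes = get_chord_notes(chord_name)
--
--     if pitch_class in chord_notes:
--         return "Chord Tone"
--     elif is_scale_note(note_name, key):
--         return "Scale Note"
--     else:
--         return "Passing Note"
-- ===== SOURCE B (Python) =====
-- NOTES = ['C', 'C#', 'D', 'D#', 'E', 'F', 'F#', 'G', 'G#', 'A', 'A#', 'B']
--
-- def classify_note(note_name, chord_name, key):
--     if not note_name or not chord_name:
--         return "Passing Note"
--     pitch_class = ''.join(c for c in note_name if not c.isdigit())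
--     pi = NOTES.index(pitch_class) if pitch_class in NOTES else None
--     root = chord_name[:2] if len(chord_name) > 1 and chord_name[1] == '#' else chord_name[0]
--     if pi is not None and root in NOTES:
--         intervals = (0, 3, 7) if ('m' in chord_name and 'maj' not in chord_name) else (0, 4, 7)
--         if (pi - NOTES.index(root)) % 12 in intervals:
--             return "Chord Tone"
--     if not key or key not in NOTES:
--         return "Scale Note"
--     if pi is not None and (pi - NOTES.index(key)) % 12 in (0, 2, 4, 5, 7, 9, 11):
--         return "Scale Note"
--     return "Passing Note"
-- ===== Notes on version B (the rewrite author's own statement) =====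
-- stated objective: simpler
-- what changed: Instead of building a set of chord/scale note-name strings per call and testing membership, B computes pitch-class indices once and tests (note_idx - root_idx) % 12 against a fixed interval list, with a single early guard structure.
import Mathlib
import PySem

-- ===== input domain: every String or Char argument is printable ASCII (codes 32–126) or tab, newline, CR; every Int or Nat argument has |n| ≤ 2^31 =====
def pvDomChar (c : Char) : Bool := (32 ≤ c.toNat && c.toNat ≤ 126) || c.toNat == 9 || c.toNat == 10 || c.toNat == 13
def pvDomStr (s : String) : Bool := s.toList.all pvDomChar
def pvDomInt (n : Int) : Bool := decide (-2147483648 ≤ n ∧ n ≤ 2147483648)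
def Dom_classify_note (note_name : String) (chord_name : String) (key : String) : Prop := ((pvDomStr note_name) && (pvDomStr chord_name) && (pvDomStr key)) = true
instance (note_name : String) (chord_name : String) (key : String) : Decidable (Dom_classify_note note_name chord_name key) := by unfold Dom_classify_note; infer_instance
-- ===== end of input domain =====

-- B replaces A's per-call construction of chord/scale note-name sets by interval arithmetic on
-- pitch-class indices (one membership test on a fixed interval list); objective: simpler.


-- ===== PORT A =====
def pyNotes : List (List Char) :=
  [['C'], ['C','#'], ['D'], ['D','#'], ['E'], ['F'], ['F','#'], ['G'], ['G','#'], ['A'], ['A','#'], ['B']]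

def get_chord_notes (chord_name : List Char) : List (List Char) :=
  -- root = chord_name[0]: classify_note only calls with chord_name ≠ [] (Python raises on []); [] totalises that unreached case
  let root0 : List Char := match chord_name with | [] => [] | c :: _ => [c]
  let root : List Char :=
    if chord_name.length > 1 ∧ chord_name[1]? = some '#'
    then PySem.List.slice chord_name none (some 2) else root0
  match PySem.List.index? pyNotes root with
  | none => []
  | some root_idx =>
    let intervals : List Int :=
      if PySem.Chars.isIn ['m'] chord_name && !PySem.Chars.isIn ['m','a','j'] chord_name
      then [0, 3, 7] else [0, 4, 7]
    let chord_notes := intervals.foldl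
      (fun acc i => acc ++ [PySem.List.pyGetD pyNotes (PySem.Int.mod ((root_idx : Int) + i) 12) []]) []
    PySem.Set.ofList chord_notes

def is_scale_note (note_name : List Char) (key : List Char) : Bool :=
  if key.isEmpty then true
  else
    match PySem.List.index? pyNotes key with
    | none => true
    | some root_idx =>
      let scale_notes : PySem.Set (List Char) :=
        ([0, 2, 4, 5, 7, 9, 11] : List Int).foldl
          (fun s i => PySem.Set.add s (PySem.List.pyGetD pyNotes (PySem.Int.mod ((root_idx : Int) + i) 12) []))
          PySem.Set.empty
      let pitch_class := note_name.filter (fun c => !(PySem.Chars.isdigit c))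
      List.contains scale_notes pitch_class

def classify_note (note_name : String) (chord_name : String) (key : String) : String :=
  if note_name.toList.isEmpty || chord_name.toList.isEmpty then "Passing Note"
  else
    let pitch_class := note_name.toList.filter (fun c => !(PySem.Chars.isdigit c))
    let chord_notes := get_chord_notes chord_name.toList
    if List.contains chord_notes pitch_class then "Chord Tone"
    else if is_scale_note note_name.toList key.toList then "Scale Note"
    else "Passing Note"

-- ===== PORT B =====
def altNotes : List (List Char) :=
  [['C'], ['C','#'], ['D'], ['D','#'], ['E'], ['F'], ['F','#'], ['G'], ['G','#'], ['A'], ['A','#'], ['B']]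

def classify_note_alt (note_name : String) (chord_name : String) (key : String) : String :=
  if note_name.toList.isEmpty || chord_name.toList.isEmpty then "Passing Note"
  else
    let cs := chord_name.toList
    let pc := note_name.toList.filter (fun c => !(PySem.Chars.isdigit c))
    let pi? := PySem.List.index? altNotes pc
    let root : List Char :=
      if cs.length > 1 ∧ cs[1]? = some '#'
      then PySem.List.slice cs none (some 2)
      else match cs with | [] => [] | c :: _ => [c]
    let chordHit : Bool :=
      match pi?, PySem.List.index? altNotes root with
      | some p, some r =>
        let ivs : List Int :=
          if PySem.Chars.isIn ['m'] cs && !PySem.Chars.isIn ['m','a','j'] cs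
          then [0, 3, 7] else [0, 4, 7]
        List.contains ivs (PySem.Int.mod ((p : Int) - (r : Int)) 12)
      | _, _ => false
    if chordHit then "Chord Tone"
    else if key.toList.isEmpty || !(List.contains altNotes key.toList) then "Scale Note"
    else
      match pi?, PySem.List.index? altNotes key.toList with
      | some p, some kr =>
        if List.contains ([0, 2, 4, 5, 7, 9, 11] : List Int) (PySem.Int.mod ((p : Int) - (kr : Int)) 12)
        then "Scale Note" else "Passing Note"
      | _, _ => "Passing Note"

-- ===== PRECONDITION & SPEC =====

-- ===== PRECONDITION & SPEC =====
def Spec_classify_note (note_name : String) (chord_name : String) (key : String) (out : String) : Prop := out = classify_note_alt note_name chord_name key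
instance (note_name : String) (chord_name : String) (key : String) (out : String) : Decidable (Spec_classify_note note_name chord_name key out) := by unfold Spec_classify_note; infer_instance

-- ===== CLAIM (what is proved, stated in full; the proofs are below) =====
def Claim_equal_classify_note : Prop := ∀ (note_name : String) (chord_name : String) (key : String), Dom_classify_note note_name chord_name key → Spec_classify_note note_name chord_name key (classify_note note_name chord_name key)

-- ===== LEMMAS AND PROOFS =====

theorem altNotes_eq : altNotes = pyNotes := rfl

theorem chord_tab : ∀ (r : Nat), r < 12 → ∀ (p : Nat), p < 12 → ∀ b : Bool,
  (List.contains (PySem.Set.ofList ((if b then ([0,3,7] : List Int) else [0,4,7]).foldl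
    (fun acc i => acc ++ [PySem.List.pyGetD pyNotes (PySem.Int.mod ((r : Int) + i) 12) []]) [])) (pyNotes.getD p [])) =
  (List.contains (if b then ([0,3,7] : List Int) else [0,4,7]) (PySem.Int.mod ((p : Int) - (r : Int)) 12)) := by decide

theorem chord_sub : ∀ (r : Nat), r < 12 → ∀ b : Bool, ∀ x ∈ (PySem.Set.ofList ((if b then ([0,3,7] : List Int) else [0,4,7]).foldl
    (fun acc i => acc ++ [PySem.List.pyGetD pyNotes (PySem.Int.mod ((r : Int) + i) 12) []]) [])), x ∈ pyNotes := by decide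

theorem scale_tab : ∀ (r : Nat), r < 12 → ∀ (p : Nat), p < 12 →
  (List.contains (([0,2,4,5,7,9,11] : List Int).foldl
      (fun s i => PySem.Set.add s (PySem.List.pyGetD pyNotes (PySem.Int.mod ((r : Int) + i) 12) []))
      PySem.Set.empty) (pyNotes.getD p [])) =
  (List.contains ([0,2,4,5,7,9,11] : List Int) (PySem.Int.mod ((p : Int) - (r : Int)) 12)) := by decide

theorem scale_sub : ∀ (r : Nat), r < 12 → ∀ x ∈ (([0,2,4,5,7,9,11] : List Int).foldl
      (fun s i => PySem.Set.add s (PySem.List.pyGetD pyNotes (PySem.Int.mod ((r : Int) + i) 12) []))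
      PySem.Set.empty), x ∈ pyNotes := by decide

theorem idx_facts {x : List Char} {p : Nat} (h : PySem.List.index? pyNotes x = some p) :
    p < 12 ∧ pyNotes.getD p [] = x := by
  obtain ⟨hk, hx, -⟩ := PySem.List.getElem_of_index?_eq_some h
  have h12 : pyNotes.length = 12 := by decide
  exact ⟨h12 ▸ hk, by rw [List.getD_eq_getElem _ _ hk]; exact hx⟩

theorem contains_eq_isSome (x : List Char) :
    List.contains pyNotes x = (PySem.List.index? pyNotes x).isSome := by
  rw [show PySem.List.index? pyNotes x = List.idxOf? x pyNotes from PySem.List.index?_eq_idxOf? _ _]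
  by_cases h : x ∈ pyNotes
  · simp [List.contains_eq_mem, h, List.isSome_idxOf?.mpr h]
  · simp [List.contains_eq_mem, h, List.idxOf?_eq_none_iff.mpr h]


-- ===== VERDICT (by name: the statement is the Claim_ definition above) =====
theorem classify_note_spec : Claim_equal_classify_note := by
  unfold Claim_equal_classify_note
  intro n c k _
  unfold Spec_classify_note
  simp only [classify_note, classify_note_alt, get_chord_notes, is_scale_note, altNotes_eq]
  by_cases hg : (n.toList.isEmpty || c.toList.isEmpty) = true
  · simp only [hg, if_true]
  · simp only [hg, Bool.false_eq_true, reduceIte]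
    generalize List.filter (fun c => !PySem.Chars.isdigit c) n.toList = pc
    generalize (if c.toList.length > 1 ∧ c.toList[1]? = some '#' then PySem.List.slice c.toList none (some 2)
                else match c.toList with | [] => [] | c :: _ => [c]) = root
    generalize (PySem.Chars.isIn ['m'] c.toList && !PySem.Chars.isIn ['m','a','j'] c.toList) = mb
    rcases hpi : PySem.List.index? pyNotes pc with _ | p
    · -- pc not a note name: chord test false on both sides, scale membership false
      have hpcmem : pc ∉ pyNotes := (PySem.List.index?_eq_none_iff _ _).mp hpi
      have hchordA : ∀ cn, (match PySem.List.index? pyNotes root with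
          | none => ([] : List (List Char))
          | some root_idx => PySem.Set.ofList ((if mb then ([0,3,7] : List Int) else [0,4,7]).foldl
              (fun acc i => acc ++ [PySem.List.pyGetD pyNotes (PySem.Int.mod ((root_idx : Int) + i) 12) []]) [])) = cn
          → List.contains cn pc = false := by
        intro cn hcn
        rcases hr : PySem.List.index? pyNotes root with _ | r
        · rw [hr] at hcn; simp [← hcn]
        · rw [hr] at hcn
          have hr12 := (idx_facts hr).1
          simp only [← hcn, List.contains_eq_mem, decide_eq_false_iff_not]
          exact fun hmem => hpcmem (chord_sub r hr12 mb _ hmem)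
      rw [hchordA _ rfl]
      simp only [Bool.false_eq_true, reduceIte]
      by_cases hk : k.toList.isEmpty = true
      · simp only [hk, Bool.true_or, reduceIte]
      · simp only [Bool.not_eq_true] at hk
        rcases hkk : PySem.List.index? pyNotes k.toList with _ | kr
        · simp [hk, (PySem.List.index?_eq_none_iff _ _).mp hkk]
        · have hkr12 := (idx_facts hkk).1
          have hsc : List.contains (([0,2,4,5,7,9,11] : List Int).foldl
              (fun s i => PySem.Set.add s (PySem.List.pyGetD pyNotes (PySem.Int.mod ((kr : Int) + i) 12) []))
              PySem.Set.empty) pc = false := by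
            simp only [List.contains_eq_mem, decide_eq_false_iff_not]
            exact fun hmem => hpcmem (scale_sub kr hkr12 _ hmem)
          simp only [hk, contains_eq_isSome, hkk, Option.isSome_some, Bool.not_true,
            Bool.or_false, Bool.false_eq_true, reduceIte]
          rw [hsc]
          try simp only [Bool.false_eq_true, reduceIte]
    · obtain ⟨hp12, hpget⟩ := idx_facts hpi
      rcases hr : PySem.List.index? pyNotes root with _ | r
      · simp only [List.contains_nil, Bool.false_eq_true, reduceIte]
        by_cases hk : k.toList.isEmpty = true
        · simp only [hk, Bool.true_or, reduceIte]
        · simp only [Bool.not_eq_true] at hk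
          rcases hkk : PySem.List.index? pyNotes k.toList with _ | kr
          · simp [hk, (PySem.List.index?_eq_none_iff _ _).mp hkk]
          · obtain ⟨hkr12, -⟩ := idx_facts hkk
            have hsc := scale_tab kr hkr12 p hp12
            rw [hpget] at hsc
            simp only [hk, contains_eq_isSome, hkk, Option.isSome_some, Bool.not_true,
              Bool.or_false, Bool.false_eq_true, reduceIte]
            rw [hsc]
            try simp only [Bool.false_eq_true, reduceIte]
      · obtain ⟨hr12, -⟩ := idx_facts hr
        have hct := chord_tab r hr12 p hp12 mb
        rw [hpget] at hct
        simp only [hct]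
        by_cases hchord : (List.contains (if mb then ([0,3,7] : List Int) else [0,4,7]) (PySem.Int.mod ((p : Int) - (r : Int)) 12)) = true
        · simp only [hchord, reduceIte]
        · simp only [Bool.not_eq_true] at hchord
          simp only [hchord, Bool.false_eq_true, reduceIte]
          by_cases hk : k.toList.isEmpty = true
          · simp only [hk, Bool.true_or, reduceIte]
          · simp only [Bool.not_eq_true] at hk
            rcases hkk : PySem.List.index? pyNotes k.toList with _ | kr
            · simp [hk, (PySem.List.index?_eq_none_iff _ _).mp hkk]
            · obtain ⟨hkr12, -⟩ := idx_facts hkk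
              have hsc := scale_tab kr hkr12 p hp12
              rw [hpget] at hsc
              simp only [hk, contains_eq_isSome, hkk, Option.isSome_some, Bool.not_true,
                Bool.or_false, Bool.false_eq_true, reduceIte]
              rw [hsc]
              try simp only [Bool.false_eq_true, reduceIte]
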